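-- pv_equiv track=rewrite | github.com/amirmallak/Translation-Data-Processing-for-Generalization-Models | main.py | replacing_string_char
-- ===== SOURCE A (Python) =====
-- from typing import List, Dict, Optional
--
-- def replacing_string_char(name: str, index: int, replace_char: Optional[str] = None):
--     name = list(name)
--     name[index] = replace_char
--     if not replace_char:
--         name.pop(index)
--
--     # Joining back into string
--     s: str = ''
--     for ch in name:
--         s += ch
--     name = s
--     return name
-- ===== SOURCE B (Python) =====
-- def replacing_string_char(name: str, index: int, replace_char=None):
--     # normalize a negative index, validate, then rebuild by slicing
--     i = index + len(name) if index < 0 else index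
--     if not (0 <= i < len(name)):
--         raise IndexError('string index out of range')
--     return name[:i] + (replace_char or '') + name[i + 1:]
-- ===== Notes on version B (the rewrite author's own statement) =====
-- stated objective: idiomatic
-- what changed: Replaced the list-conversion + element assignment + pop + character-by-character rejoin loop with index normalization, an explicit bounds check, and a single slice concatenation name[:i] + (replace_char or '') + name[i+1:].
import Mathlib
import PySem

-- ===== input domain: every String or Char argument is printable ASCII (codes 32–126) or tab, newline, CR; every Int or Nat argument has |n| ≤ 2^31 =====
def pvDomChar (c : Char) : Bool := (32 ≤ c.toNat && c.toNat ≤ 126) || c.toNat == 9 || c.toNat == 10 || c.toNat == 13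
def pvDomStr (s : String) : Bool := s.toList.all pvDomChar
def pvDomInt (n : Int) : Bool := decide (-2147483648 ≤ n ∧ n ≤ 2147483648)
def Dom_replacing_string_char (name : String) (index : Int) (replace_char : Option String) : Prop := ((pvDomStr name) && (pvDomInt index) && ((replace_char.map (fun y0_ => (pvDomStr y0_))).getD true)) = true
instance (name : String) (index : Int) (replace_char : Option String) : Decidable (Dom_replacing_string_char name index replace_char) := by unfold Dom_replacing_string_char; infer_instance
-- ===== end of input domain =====

-- B replaces A's list-conversion + assignment + pop + char-by-char rejoin loop by index
-- normalization, a bounds check, and one slice concatenation (idiomatic rewrite).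

-- ===== PORT A =====
-- name = list(name): a list of 1-char strings; its element type is Optional[str] since
-- replace_char (possibly None) is assigned into it.
def replacing_string_char (name : String) (index : Int) (replace_char : Option String) : String :=
  let lst : List (Option String) := name.toList.map (fun c => some (String.ofList [c]))
  match PySem.List.pySet? lst index replace_char with
  | none => ""            -- IndexError (excluded by Pre_)
  | some lst1 =>
    -- `if not replace_char`: None or the empty string is falsy
    let lst2 : List (Option String) :=
      if (replace_char.getD "").toList.isEmpty then
        match PySem.List.pop? lst1 index with
        | none => lst1    -- IndexError (unreachable here: same index as the assignment)
        | some r => r.2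
      else lst1
    -- s = ''; for ch in name: s += ch   (ported on code points: Lean's String append is opaque)
    String.ofList (lst2.foldl (fun s o => s ++ (o.getD "").toList) [])

-- ===== PORT B =====
def replacing_string_char_alt (name : String) (index : Int) (replace_char : Option String) : String :=
  let cs : List Char := name.toList
  let n : Int := cs.length
  let i : Int := if index < 0 then index + n else index
  if 0 ≤ i ∧ i < n then
    -- name[:i] + (replace_char or '') + name[i+1:]   (on code points)
    String.ofList (PySem.List.slice cs none (some i) ++ (replace_char.getD "").toList ++
                   PySem.List.slice cs (some (i + 1)) none)
  else ""                 -- raise IndexError (excluded by Pre_)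

-- ===== PRECONDITION & SPEC =====
-- Pre_ excludes exactly the out-of-range indices, on which both A and B raise IndexError.
def Pre_replacing_string_char (name : String) (index : Int) (replace_char : Option String) : Prop :=
  PySem.Raise.InRange name.toList.length index
instance (name : String) (index : Int) (replace_char : Option String) : Decidable (Pre_replacing_string_char name index replace_char) := by unfold Pre_replacing_string_char; infer_instance

def pvWitness_replacing_string_char : String × Int × Option String := ("abc", 1, some "X")

def Spec_replacing_string_char (name : String) (index : Int) (replace_char : Option String) (out : String) : Prop := out = replacing_string_char_alt name index replace_char
instance (name : String) (index : Int) (replace_char : Option String) (out : String) : Decidable (Spec_replacing_string_char name index replace_char out) := by unfold Spec_replacing_string_char; infer_instance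

-- ===== CLAIM (what is proved, stated in full; the proofs are below) =====
def Claim_equal_replacing_string_char : Prop := ∀ (name : String) (index : Int) (replace_char : Option String), Dom_replacing_string_char name index replace_char → Pre_replacing_string_char name index replace_char → Spec_replacing_string_char name index replace_char (replacing_string_char name index replace_char)

-- ===== LEMMAS AND PROOFS =====

-- the += join loop, as flatten
theorem pv_foldl_join (cs : List (Option String)) (a : List Char) :
    cs.foldl (fun s o => s ++ (o.getD "").toList) a
      = a ++ (cs.map (fun o => (o.getD "").toList)).flatten := by
  induction cs generalizing a with
  | nil => simp
  | cons c cs ih => simp [List.foldl_cons, ih, List.append_assoc]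

theorem pv_flatten_singletons (l : List Char) :
    (l.map (fun c => (((some (String.ofList [c])).getD "").toList))).flatten = l := by
  induction l with
  | nil => simp
  | cons c l ih =>
    simp only [List.map_cons, List.flatten_cons, ih]
    simp

theorem pv_eraseIdx_set (xs : List (Option String)) (i : Nat) (v : Option String) :
    (xs.set i v).eraseIdx i = xs.eraseIdx i := by
  induction xs generalizing i with
  | nil => simp
  | cons x xs ih =>
    cases i with
    | zero => simp
    | succ j => simp [List.set_cons_succ, List.eraseIdx_cons_succ, ih]

theorem pv_join_set (cs : List Char) (j : Nat) (hj : j < cs.length) (rc : Option String) :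
    (((cs.map (fun c => some (String.ofList [c]))).set j rc).map
        (fun o => (o.getD "").toList)).flatten
      = cs.take j ++ (rc.getD "").toList ++ cs.drop (j + 1) := by
  rw [List.set_eq_take_append_cons_drop, if_pos (by simpa using hj)]
  simp only [List.map_append, List.map_cons, List.flatten_append, List.flatten_cons,
    ← List.map_take, ← List.map_drop, List.map_map]
  rw [show ((fun o => (Option.getD o "").toList) ∘ fun c => some (String.ofList [c]))
        = (fun c => ((some (String.ofList [c])).getD "").toList) from rfl]
  rw [pv_flatten_singletons, pv_flatten_singletons]
  simp [List.append_assoc]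

theorem pv_join_erase (cs : List Char) (j : Nat) (rc : Option String) :
    ((((cs.map (fun c => some (String.ofList [c]))).set j rc).eraseIdx j).map
        (fun o => (o.getD "").toList)).flatten
      = cs.take j ++ cs.drop (j + 1) := by
  rw [pv_eraseIdx_set, List.eraseIdx_eq_take_drop_succ]
  simp only [List.map_append, List.flatten_append, ← List.map_take, ← List.map_drop,
    List.map_map]
  rw [show ((fun o => (Option.getD o "").toList) ∘ fun c => some (String.ofList [c]))
        = (fun c => ((some (String.ofList [c])).getD "").toList) from rfl]
  rw [pv_flatten_singletons, pv_flatten_singletons]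

theorem replacing_string_char_spec : Claim_equal_replacing_string_char := by
  intro name index rc _ hpre
  obtain ⟨h1, h2⟩ := hpre
  unfold Spec_replacing_string_char replacing_string_char replacing_string_char_alt
  set cs := name.toList with hcs
  -- the normalized Nat index j
  obtain ⟨j, hj, hidx, hnorm⟩ :
      ∃ j : Nat, j < cs.length ∧ PySem.List.pyIdx? cs.length index = some j ∧
        (if index < 0 then index + (cs.length : Int) else index) = (j : Int) := by
    by_cases hneg : 0 ≤ index
    · refine ⟨index.toNat, by omega, ?_, ?_⟩
      · simp [PySem.List.pyIdx?, hneg, h2]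
      · have := Int.toNat_of_nonneg hneg
        split <;> omega
    · have hx : 0 ≤ -index := by omega
      have hx' := Int.toNat_of_nonneg hx
      refine ⟨cs.length - (-index).toNat, by omega, ?_, ?_⟩
      · simp only [PySem.List.pyIdx?, if_neg hneg, if_pos h1]
      · split <;> omega
  have hset : PySem.List.pySet? (cs.map (fun c => some (String.ofList [c]))) index rc
      = some ((cs.map (fun c => some (String.ofList [c]))).set j rc) := by
    simp [PySem.List.pySet?, hidx]
  have hj' : j < ((cs.map (fun c => some (String.ofList [c]))).set j rc).length := by
    simpa using hj
  have hpop : PySem.List.pop? ((cs.map (fun c => some (String.ofList [c]))).set j rc) index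
      = some ((((cs.map (fun c => some (String.ofList [c]))).set j rc))[j],
              ((cs.map (fun c => some (String.ofList [c]))).set j rc).eraseIdx j) := by
    simp only [PySem.List.pop?, List.length_set, List.length_map, hidx, Option.bind_some,
      List.getElem?_eq_getElem hj', Option.map_some]
  simp only [hset, hpop, hnorm]
  have hcond : (0 ≤ (j : Int) ∧ (j : Int) < (cs.length : Int)) := by
    constructor <;> omega
  rw [if_pos hcond]
  rw [PySem.List.slice_to_natCast]
  rw [show ((j : Int) + 1) = ((j + 1 : Nat) : Int) by push_cast; ring]
  rw [PySem.List.slice_from_natCast]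
  by_cases hemp : (rc.getD "").toList.isEmpty
  · have hnilmid : (rc.getD "").toList = [] := by simpa using hemp
    simp only [if_pos hemp]
    rw [pv_foldl_join, pv_join_erase cs j rc]
    simp [hnilmid]
  · simp only [if_neg hemp]
    rw [pv_foldl_join, pv_join_set cs j hj rc]
    simp
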